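-- pv_equiv track=rewrite | github.com/bio-hpc/STELLAR | STELLAR/save_pose_CN_coordinates.py | extract_last_residue
-- ===== SOURCE A (Python) =====
-- def extract_last_residue(atoms):
--     """Atoms of the last residue (maximum residue number).
--     Same logic as check_overlap_VS_GN.py and check_overlap_VS_LF_Def.py."""
--     if not atoms:
--         return []
--     # Convert the 6th element (index 5) to integer and find the maximum value
--     try:
--         max_value = max(int(t[5]) for t in atoms)
--         # Extract and return the tuples with the maximum 6th element value
--         return [t for t in atoms if int(t[5]) == max_value]
--     except (ValueError, IndexError):
--         return atoms
-- ===== SOURCE B (Python) =====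
-- def extract_last_residue(atoms):
--     if not atoms:
--         return []
--     groups = {}
--     try:
--         for t in atoms:
--             groups.setdefault(int(t[5]), []).append(t)
--     except (ValueError, IndexError):
--         return atoms
--     return groups[max(groups)]
-- ===== Notes on version B (the rewrite author's own statement) =====
-- stated objective: alternative
-- what changed: Replaced A's max-pass plus a re-parsing filter pass with a dict that groups the atoms by their parsed residue number in one loop, then returns the group of the maximum key, parsing each atom's field exactly once.
import Mathlib
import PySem

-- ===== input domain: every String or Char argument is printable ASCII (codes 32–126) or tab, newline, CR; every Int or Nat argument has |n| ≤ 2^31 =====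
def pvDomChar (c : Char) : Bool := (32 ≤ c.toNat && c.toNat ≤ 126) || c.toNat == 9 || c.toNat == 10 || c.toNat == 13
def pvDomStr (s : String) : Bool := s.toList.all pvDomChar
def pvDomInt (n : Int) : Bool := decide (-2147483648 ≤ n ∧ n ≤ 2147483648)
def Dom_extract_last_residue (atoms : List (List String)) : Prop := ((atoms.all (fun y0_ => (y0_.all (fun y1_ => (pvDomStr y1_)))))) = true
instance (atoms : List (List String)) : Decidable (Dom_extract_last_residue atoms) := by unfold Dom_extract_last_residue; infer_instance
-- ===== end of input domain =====

-- B groups the atoms by their parsed residue number into a dict in one loop and returns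
-- the group of the maximum key, instead of A's max pass followed by a re-parsing filter pass.

-- ===== PORT A =====
-- int(t[5]) : none = ValueError or IndexError
def pvVal? (t : List String) : Option Int :=
  (PySem.List.pyGet? t 5).bind PySem.Int.ofStr?

-- max(int(t[5]) for t in atoms): left-to-right, none as soon as a parse raises
def pvMaxFold (acc : Option Int) : List (List String) → Option Int
  | [] => acc
  | t :: ts =>
    match pvVal? t with
    | none => none
    | some v =>
      match acc with
      | none => pvMaxFold (some v) ts
      | some m => pvMaxFold (some (max m v)) ts

def extract_last_residue (atoms : List (List String)) : List (List String) :=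
  if atoms = [] then []
  else
    match pvMaxFold none atoms with
    | none => atoms
    | some m => atoms.filter (fun t => pvVal? t == some m)

-- ===== PORT B =====
-- int(t[5]) on B's side
def pvValB? (t : List String) : Option Int :=
  (PySem.List.pyGet? t 5).bind PySem.Int.ofStr?

-- the grouping loop: groups.setdefault(int(t[5]), []).append(t); none = a parse raised
def pvGroupLoop (d : PySem.Dict Int (List (List String))) :
    List (List String) → Option (PySem.Dict Int (List (List String)))
  | [] => some d
  | t :: ts =>
    match pvValB? t with
    | none => none
    | some v => pvGroupLoop (d.modify v [] (fun g => g ++ [t])) ts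

def extract_last_residue_alt (atoms : List (List String)) : List (List String) :=
  if atoms = [] then []
  else
    match pvGroupLoop PySem.Dict.empty atoms with
    | none => atoms
    | some g =>
      match PySem.List.max? g.keys (fun k => k) with
      | none => []   -- unreachable: atoms nonempty ⇒ the dict has a key (max([]) cannot be hit)
      | some m => g.getD m []

-- ===== PRECONDITION & SPEC =====
def Spec_extract_last_residue (atoms : List (List String)) (out : List (List String)) : Prop := out = extract_last_residue_alt atoms
instance (atoms : List (List String)) (out : List (List String)) : Decidable (Spec_extract_last_residue atoms out) := by unfold Spec_extract_last_residue; infer_instance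

-- ===== CLAIM (what is proved, stated in full; the proofs are below) =====
def Claim_equal_extract_last_residue : Prop := ∀ (atoms : List (List String)), Dom_extract_last_residue atoms → Spec_extract_last_residue atoms (extract_last_residue atoms)

-- ===== LEMMAS AND PROOFS =====

theorem pvValB_eq (t : List String) : pvValB? t = pvVal? t := rfl

-- both loops fail on exactly the same inputs (first failing parse)
theorem pvGroupLoop_none_iff (ts : List (List String)) :
    ∀ (d : PySem.Dict Int (List (List String))) (m : Int),
      (pvGroupLoop d ts = none ↔ pvMaxFold (some m) ts = none) := by
  induction ts with
  | nil => intro d m; simp [pvGroupLoop, pvMaxFold]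
  | cons t ts ih =>
    intro d m
    simp only [pvGroupLoop, pvMaxFold, pvValB_eq]
    cases pvVal? t with
    | none => simp
    | some v => simpa using ih _ (max m v)

theorem pvMaxFold_ge (ts : List (List String)) :
    ∀ (m M : Int), pvMaxFold (some m) ts = some M → m ≤ M := by
  induction ts with
  | nil => intro m M h; simp [pvMaxFold] at h; omega
  | cons t ts ih =>
    intro m M h
    simp only [pvMaxFold] at h
    cases hv : pvVal? t with
    | none => rw [hv] at h; simp at h
    | some v =>
      rw [hv] at h
      have := ih (max m v) M h
      omega

theorem pvMaxFold_isMax (ts : List (List String)) :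
    ∀ (m M : Int), pvMaxFold (some m) ts = some M →
      ∀ t ∈ ts, ∀ v, pvVal? t = some v → v ≤ M := by
  induction ts with
  | nil => intro m M _ t ht; simp at ht
  | cons t ts ih =>
    intro m M h u hu v hv
    simp only [pvMaxFold] at h
    cases hvt : pvVal? t with
    | none => rw [hvt] at h; simp at h
    | some w =>
      rw [hvt] at h
      rcases List.mem_cons.mp hu with rfl | hu'
      · have hw : w ≤ M := le_trans (le_max_right m w) (pvMaxFold_ge ts _ _ h)
        rw [hvt] at hv; injection hv with hv; omega
      · exact ih (max m w) M h u hu' v hv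

theorem pvMaxFold_attained (ts : List (List String)) :
    ∀ (m M : Int), pvMaxFold (some m) ts = some M →
      M = m ∨ ∃ t ∈ ts, pvVal? t = some M := by
  induction ts with
  | nil => intro m M h; simp [pvMaxFold] at h; left; omega
  | cons t ts ih =>
    intro m M h
    simp only [pvMaxFold] at h
    cases hvt : pvVal? t with
    | none => rw [hvt] at h; simp at h
    | some w =>
      rw [hvt] at h
      rcases ih (max m w) M h with hM | ⟨u, hu, hval⟩
      · rcases le_or_gt w m with hle | hlt
        · left; rw [hM]; omega
        · right; exact ⟨t, List.mem_cons_self, by rw [hvt, hM, max_eq_right (le_of_lt hlt)]⟩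
      · right; exact ⟨u, List.mem_cons_of_mem _ hu, hval⟩

-- the groups dict maps each key to exactly the atoms with that residue number, in order
theorem pvGroupLoop_getD (ts : List (List String)) :
    ∀ (d g : PySem.Dict Int (List (List String))), pvGroupLoop d ts = some g →
      ∀ k, g.getD k [] = d.getD k [] ++ ts.filter (fun t => pvVal? t == some k) := by
  induction ts with
  | nil => intro d g h k; simp [pvGroupLoop] at h; subst h; simp
  | cons t ts ih =>
    intro d g h k
    simp only [pvGroupLoop, pvValB_eq] at h
    cases hv : pvVal? t with
    | none => rw [hv] at h; simp at h
    | some v =>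
      rw [hv] at h
      rw [ih _ g h k, PySem.Dict.getD_modify, List.filter_cons]
      by_cases hk : k = v
      · subst hk; simp [hv]
      · have : ((pvVal? t == some k) : Bool) = false := by
          simp [hv]; exact fun hh => hk hh.symm
        simp [hk, this]

theorem pvGroupLoop_contains (ts : List (List String)) :
    ∀ (d g : PySem.Dict Int (List (List String))), pvGroupLoop d ts = some g →
      ∀ k, g.contains k = (d.contains k || ts.any (fun t => pvVal? t == some k)) := by
  induction ts with
  | nil => intro d g h k; simp [pvGroupLoop] at h; subst h; simp
  | cons t ts ih =>
    intro d g h k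
    simp only [pvGroupLoop, pvValB_eq] at h
    cases hv : pvVal? t with
    | none => rw [hv] at h; simp at h
    | some v =>
      rw [hv] at h
      rw [ih _ g h k, PySem.Dict.contains_modify, List.any_cons]
      by_cases hk : k = v
      · subst hk; simp [hv]
      · have hb : (k == v) = false := beq_eq_false_iff_ne.mpr hk
        have hb2 : ((pvVal? t == some k) : Bool) = false := by
          simp [hv]; exact fun hh => hk hh.symm
        simp [hb, hb2]

-- with atoms = t :: ts all parsing, B's max(groups) is A's max value
theorem pvMaxKeys (t : List String) (ts : List (List String))
    (g : PySem.Dict Int (List (List String))) (M : Int)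
    (hg : pvGroupLoop PySem.Dict.empty (t :: ts) = some g)
    (hM : pvMaxFold none (t :: ts) = some M) :
    PySem.List.max? g.keys (fun k => k) = some M := by
  have hcont := pvGroupLoop_contains (t :: ts) _ g hg
  -- characterize keys: k ∈ g.keys ↔ some atom has value k
  have hkeys : ∀ k, k ∈ g.keys ↔ (t :: ts).any (fun u => pvVal? u == some k) = true := by
    intro k
    rw [← PySem.Dict.contains_iff_mem_keys, hcont k]
    simp [PySem.Dict.contains_empty]
  -- unfold hM one step
  simp only [pvMaxFold] at hM
  cases hv : pvVal? t with
  | none => rw [hv] at hM; simp at hM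
  | some v =>
    rw [hv] at hM
    -- M is attained
    have hatt : ∃ u ∈ t :: ts, pvVal? u = some M := by
      rcases pvMaxFold_attained ts v M hM with rfl | ⟨u, hu, hval⟩
      · exact ⟨t, List.mem_cons_self, hv⟩
      · exact ⟨u, List.mem_cons_of_mem _ hu, hval⟩
    have hMmem : M ∈ g.keys := by
      rcases hatt with ⟨u, hu, hval⟩
      exact (hkeys M).mpr (List.any_eq_true.mpr ⟨u, hu, beq_iff_eq.mpr hval⟩)
    -- every key ≤ M
    have hbound : ∀ k ∈ g.keys, k ≤ M := by
      intro k hk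
      rcases List.any_eq_true.mp ((hkeys k).mp hk) with ⟨u, hu, hval⟩
      rcases List.mem_cons.mp hu with rfl | hu'
      · have heq : pvVal? u = some k := eq_of_beq hval
        rw [hv] at heq; injection heq with heq
        subst heq; exact pvMaxFold_ge ts _ _ hM
      · exact pvMaxFold_isMax ts v M hM u hu' k (eq_of_beq hval)
    -- max? of a nonempty list whose max value is M
    cases hmx : PySem.List.max? g.keys (fun k => k) with
    | none =>
      rw [PySem.List.max?_eq_none_iff] at hmx
      rw [hmx] at hMmem; simp at hMmem
    | some m' =>
      have h1 : m' ∈ g.keys := PySem.List.max?_mem hmx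
      have h2 : M ≤ m' := PySem.List.max?_isMax hmx M hMmem
      have h3 : m' ≤ M := hbound m' h1
      rw [le_antisymm h3 h2]

-- ===== VERDICT (by name: the statement is the Claim_ definition above) =====
theorem extract_last_residue_spec : Claim_equal_extract_last_residue := by
  unfold Claim_equal_extract_last_residue Spec_extract_last_residue
  intro atoms _
  unfold extract_last_residue extract_last_residue_alt
  cases atoms with
  | nil => simp
  | cons t ts =>
    simp only [if_neg (List.cons_ne_nil t ts)]
    cases hg : pvGroupLoop PySem.Dict.empty (t :: ts) with
    | none =>
      have : pvMaxFold none (t :: ts) = none := by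
        simp only [pvMaxFold, pvGroupLoop, pvValB_eq] at hg ⊢
        cases hv : pvVal? t with
        | none => simp
        | some v =>
          simp only [hv] at hg
          exact (pvGroupLoop_none_iff ts _ v).mp hg
      rw [this]
    | some g =>
      have hMex : ∃ M, pvMaxFold none (t :: ts) = some M := by
        cases hM : pvMaxFold none (t :: ts) with
        | none =>
          exfalso
          simp only [pvMaxFold, pvGroupLoop, pvValB_eq] at hg hM
          cases hv : pvVal? t with
          | none => rw [hv] at hg; simp at hg
          | some v =>
            simp only [hv] at hg hM
            rw [(pvGroupLoop_none_iff ts _ v).mpr hM] at hg; simp at hg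
        | some M => exact ⟨M, rfl⟩
      rcases hMex with ⟨M, hM⟩
      rw [hM]
      simp only
      rw [pvMaxKeys t ts g M hg hM]
      simp only
      rw [pvGroupLoop_getD (t :: ts) _ g hg M]
      simp [PySem.Dict.getD_empty]
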